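-- pv_equiv track=rewrite | github.com/guang-yng/legato | utils/convert.py | generate_dummy_voice
-- ===== SOURCE A (Python) =====
-- def generate_dummy_voice(num_measures, num_8th, ending):
--     rest = f"x{num_8th}"
--     cur_measures = 0
--     content = ""
--     while cur_measures + 5 < num_measures:
--         content += f" {rest} | {rest} | {rest} | {rest} | {rest} | %{cur_measures + 5}\n"
--         cur_measures += 5
--     while cur_measures < num_measures:
--         content += f" {rest} |"
--         cur_measures += 1
--     content += ending
--     return content
-- ===== SOURCE B (Python) =====
-- def generate_dummy_voice(num_measures, num_8th, ending):
--     rest = f"x{num_8th}"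
--     content = ""
--     cur = 1
--     while cur <= num_measures:
--         content += f" {rest} |"
--         if cur % 5 == 0 and cur < num_measures:
--             content += f" %{cur}\n"
--         cur += 1
--     content += ending
--     return content
-- ===== Notes on version B (the rewrite author's own statement) =====
-- stated objective: simpler
-- what changed: Replaces A's two sequential while loops (a 5-measure block emitter plus a remainder loop) with one per-measure counter loop that decides marker placement by cur % 5 == 0 and cur < num_measures.
import Mathlib
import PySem

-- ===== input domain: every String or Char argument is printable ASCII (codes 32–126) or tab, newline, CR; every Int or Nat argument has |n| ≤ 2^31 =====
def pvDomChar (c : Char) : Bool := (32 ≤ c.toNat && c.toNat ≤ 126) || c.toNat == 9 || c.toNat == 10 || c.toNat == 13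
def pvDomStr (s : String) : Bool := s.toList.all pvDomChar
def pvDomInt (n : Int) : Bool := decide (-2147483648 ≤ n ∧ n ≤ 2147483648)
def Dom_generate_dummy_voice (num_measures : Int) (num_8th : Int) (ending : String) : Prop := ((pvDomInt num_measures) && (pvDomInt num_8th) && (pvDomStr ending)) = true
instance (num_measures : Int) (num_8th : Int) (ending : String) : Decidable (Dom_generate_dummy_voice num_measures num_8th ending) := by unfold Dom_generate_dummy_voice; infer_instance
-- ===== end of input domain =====

-- B merges A's two sequential while loops (5-measure block emitter + remainder loop) into one
-- counter-driven per-measure loop deciding marker placement by cur % 5 == 0 and cur < num_measures.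
-- ===== PORT A =====
-- first while loop of A: emits full 5-measure blocks with their %marker
def pvLoopA1 (n : Int) (rest : String) (cur : Int) (content : String) : Int × String :=
  if cur + 5 < n then
    pvLoopA1 n rest (cur + 5)
      (content ++ " " ++ rest ++ " | " ++ rest ++ " | " ++ rest ++ " | " ++ rest ++ " | " ++
        rest ++ " | %" ++ PySem.Int.toStr (cur + 5) ++ "\n")
  else (cur, content)
termination_by (n - cur).toNat
decreasing_by omega

-- second while loop of A: remaining measures, no markers
def pvLoopA2 (n : Int) (rest : String) (cur : Int) (content : String) : String :=
  if cur < n then pvLoopA2 n rest (cur + 1) (content ++ " " ++ rest ++ " |")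
  else content
termination_by (n - cur).toNat
decreasing_by omega

def generate_dummy_voice (num_measures : Int) (num_8th : Int) (ending : String) : String :=
  let rest := "x" ++ PySem.Int.toStr num_8th
  let r1 := pvLoopA1 num_measures rest 0 ""
  pvLoopA2 num_measures rest r1.1 r1.2 ++ ending

-- ===== PORT B =====
-- the single while loop of B: one measure per iteration, marker when cur % 5 == 0 and cur < n
def pvLoopB (n : Int) (rest : String) (cur : Int) (content : String) : String :=
  if cur ≤ n then
    let content := content ++ " " ++ rest ++ " |"
    let content := if PySem.Int.mod cur 5 = 0 ∧ cur < n then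
        content ++ " %" ++ PySem.Int.toStr cur ++ "\n" else content
    pvLoopB n rest (cur + 1) content
  else content
termination_by (n + 1 - cur).toNat
decreasing_by omega

def generate_dummy_voice_alt (num_measures : Int) (num_8th : Int) (ending : String) : String :=
  let rest := "x" ++ PySem.Int.toStr num_8th
  pvLoopB num_measures rest 1 "" ++ ending

-- ===== PRECONDITION & SPEC =====
def Spec_generate_dummy_voice (num_measures : Int) (num_8th : Int) (ending : String) (out : String) : Prop := out = generate_dummy_voice_alt num_measures num_8th ending
instance (num_measures : Int) (num_8th : Int) (ending : String) (out : String) : Decidable (Spec_generate_dummy_voice num_measures num_8th ending out) := by unfold Spec_generate_dummy_voice; infer_instance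

-- ===== CLAIM (what is proved, stated in full; the proofs are below) =====
def Claim_equal_generate_dummy_voice : Prop := ∀ (num_measures : Int) (num_8th : Int) (ending : String), Dom_generate_dummy_voice num_measures num_8th ending → Spec_generate_dummy_voice num_measures num_8th ending (generate_dummy_voice num_measures num_8th ending)

-- ===== LEMMAS AND PROOFS =====

theorem pvMod_eq (a : Int) : PySem.Int.mod a 5 = a % 5 := by
  rw [PySem.Int.mod_eq_emod_of_pos]; omega

theorem pvLit1 (s : String) : (" |" : String) ++ (" " ++ s) = " | " ++ s := by
  rw [← String.append_assoc]; rfl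

theorem pvLit2 (s : String) : (" |" : String) ++ (" %" ++ s) = " | %" ++ s := by
  rw [← String.append_assoc]; rfl

-- unfolding pvLoopB through one full 5-measure block
theorem pvLoopB_block (n : Int) (rest : String) (c : Int) (content : String)
    (h5 : c % 5 = 0) (hlt : c + 5 < n) :
    pvLoopB n rest (c + 1) content =
      pvLoopB n rest (c + 6)
        (content ++ " " ++ rest ++ " | " ++ rest ++ " | " ++ rest ++ " | " ++ rest ++ " | " ++
          rest ++ " | %" ++ PySem.Int.toStr (c + 5) ++ "\n") := by
  rw [pvLoopB, if_pos (by omega : c + 1 ≤ n)]; dsimp only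
  rw [if_neg (by rw [pvMod_eq]; omega : ¬(PySem.Int.mod (c+1) 5 = 0 ∧ c + 1 < n))]
  rw [pvLoopB, if_pos (by omega : c + 1 + 1 ≤ n)]; dsimp only
  rw [if_neg (by rw [pvMod_eq]; omega : ¬(PySem.Int.mod (c+1+1) 5 = 0 ∧ c + 1 + 1 < n))]
  rw [pvLoopB, if_pos (by omega : c + 1 + 1 + 1 ≤ n)]; dsimp only
  rw [if_neg (by rw [pvMod_eq]; omega : ¬(PySem.Int.mod (c+1+1+1) 5 = 0 ∧ c + 1 + 1 + 1 < n))]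
  rw [pvLoopB, if_pos (by omega : c + 1 + 1 + 1 + 1 ≤ n)]; dsimp only
  rw [if_neg (by rw [pvMod_eq]; omega : ¬(PySem.Int.mod (c+1+1+1+1) 5 = 0 ∧ c + 1 + 1 + 1 + 1 < n))]
  rw [pvLoopB, if_pos (by omega : c + 1 + 1 + 1 + 1 + 1 ≤ n)]; dsimp only
  rw [if_pos (by rw [pvMod_eq]; constructor <;> omega :
        (PySem.Int.mod (c+1+1+1+1+1) 5 = 0 ∧ c + 1 + 1 + 1 + 1 + 1 < n))]
  rw [show c + 1 + 1 + 1 + 1 + 1 = c + 5 by omega, show c + 5 + 1 = c + 6 by omega]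
  refine congrArg (pvLoopB n rest (c + 6)) ?_
  simp only [String.append_assoc, pvLit1, pvLit2]

-- when no marker index remains strictly below n, pvLoopB coincides with A's second loop
theorem pvLoopB_tail (n : Int) (rest : String) (c : Int) (content : String)
    (H : ∀ j : Int, c < j → j < n → ¬ j % 5 = 0) :
    pvLoopB n rest (c + 1) content = pvLoopA2 n rest c content := by
  by_cases h : c < n
  · rw [pvLoopB, if_pos (by omega : c + 1 ≤ n)]; dsimp only
    rw [if_neg (by rw [pvMod_eq]; intro hx; exact H (c+1) (by omega) hx.2 hx.1)]
    rw [pvLoopA2, if_pos h]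
    exact pvLoopB_tail n rest (c + 1) _ (fun j hj hjn => H j (by omega) hjn)
  · rw [pvLoopB, if_neg (by omega : ¬ c + 1 ≤ n), pvLoopA2, if_neg h]
termination_by (n - c).toNat
decreasing_by omega

-- main invariant: B's loop from c+1 computes A's phase 1 then phase 2, for c a multiple of 5
theorem pvLoop_main (n : Int) (rest : String) (c : Int) (content : String) (h5 : c % 5 = 0) :
    pvLoopB n rest (c + 1) content =
      pvLoopA2 n rest (pvLoopA1 n rest c content).1 (pvLoopA1 n rest c content).2 := by
  by_cases h : c + 5 < n
  · rw [pvLoopA1, if_pos h]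
    rw [pvLoopB_block n rest c content h5 h]
    have ih := pvLoop_main n rest (c + 5)
      (content ++ " " ++ rest ++ " | " ++ rest ++ " | " ++ rest ++ " | " ++ rest ++ " | " ++
        rest ++ " | %" ++ PySem.Int.toStr (c + 5) ++ "\n") (by omega)
    rw [show c + 6 = c + 5 + 1 by omega]
    exact ih
  · rw [pvLoopA1, if_neg h]
    exact pvLoopB_tail n rest c content (fun j hj hjn hjm => by omega)
termination_by (n - c).toNat
decreasing_by omega

-- ===== VERDICT (by name: the statement is the Claim_ definition above) =====
theorem generate_dummy_voice_spec : Claim_equal_generate_dummy_voice := by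
  intro n k e _
  unfold Spec_generate_dummy_voice generate_dummy_voice generate_dummy_voice_alt
  dsimp only
  have h := pvLoop_main n ("x" ++ PySem.Int.toStr k) 0 "" (by omega)
  norm_num at h
  rw [h]
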